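-- pv_equiv track=rewrite | github.com/gburachas/pytoclaw | src/pyclaw/skills/search_cache.py | _build_trigrams
-- ===== SOURCE A (Python) =====
-- def _build_trigrams(s: str) -> list[int]:
--     """Build sorted, deduplicated trigram hashes from a string."""
--     if len(s) < 3:
--         return []
--     trigrams: list[int] = []
--     for i in range(len(s) - 2):
--         trigrams.append(ord(s[i]) << 16 | ord(s[i + 1]) << 8 | ord(s[i + 2]))
--
--     trigrams.sort()
--     # Deduplicate.
--     deduped = [trigrams[0]]
--     for i in range(1, len(trigrams)):
--         if trigrams[i] != trigrams[i - 1]: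
--             deduped.append(trigrams[i])
--     return deduped
-- ===== SOURCE B (Python) =====
-- def _build_trigrams(s: str) -> list[int]:
--     """Build sorted, deduplicated trigram hashes from a string."""
--     hashes = [ord(s[i]) << 16 | ord(s[i + 1]) << 8 | ord(s[i + 2])
--               for i in range(len(s) - 2)]
--     return _merge_unique_sort(hashes)
--
--
-- def _merge_unique_sort(xs: list[int]) -> list[int]:
--     """Divide-and-conquer: sort and deduplicate via a duplicate-dropping merge."""
--     if len(xs) <= 1:
--         return xs
--     mid = len(xs) // 2
--     return _merge_unique(_merge_unique_sort(xs[:mid]), _merge_unique_sort(xs[mid:]))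
--
--
-- def _merge_unique(a: list[int], b: list[int]) -> list[int]:
--     """Merge two strictly increasing lists, emitting each common value once."""
--     out = []
--     i = j = 0
--     while i < len(a) and j < len(b):
--         if a[i] < b[j]:
--             out.append(a[i]); i += 1
--         elif b[j] < a[i]:
--             out.append(b[j]); j += 1
--         else:
--             out.append(a[i]); i += 1; j += 1
--     out.extend(a[i:])
--     out.extend(b[j:])
--     return out
-- ===== Notes on version B (the rewrite author's own statement) =====
-- stated objective: alternative
-- what changed: A's append-all / library-sort / adjacent-comparison dedup pipeline is replaced by a hand-written divide-and-conquer merge sort whose merge step drops duplicates as it merges, so there is no sort() call and no separate dedup pass.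
import Mathlib
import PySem

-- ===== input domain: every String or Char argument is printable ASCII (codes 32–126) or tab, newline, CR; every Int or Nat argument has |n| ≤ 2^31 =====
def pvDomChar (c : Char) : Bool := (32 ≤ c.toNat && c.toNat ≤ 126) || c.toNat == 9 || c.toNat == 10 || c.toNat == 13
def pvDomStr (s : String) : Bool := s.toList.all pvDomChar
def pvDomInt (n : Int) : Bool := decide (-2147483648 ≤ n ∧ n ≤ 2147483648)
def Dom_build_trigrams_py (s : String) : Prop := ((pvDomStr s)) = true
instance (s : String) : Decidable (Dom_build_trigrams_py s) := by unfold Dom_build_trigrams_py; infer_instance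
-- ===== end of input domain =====

-- B replaces A's append-all / sort() / adjacent-dedup pipeline by a hand-written divide-and-conquer
-- merge sort whose merge step drops duplicates (alternative algorithm; return value proved equal).

-- ===== PORT A =====
-- trigram hash ord(s[i])<<16 | ord(s[i+1])<<8 | ord(s[i+2])  (shared hash expression of both sources)
def pvTri (cs : List Char) (i : Int) : Int :=
  PySem.Int.bor
    (PySem.Int.bor (((PySem.List.pyGetD cs i 'A').toNat : Int) <<< 16)
                   (((PySem.List.pyGetD cs (i + 1) 'A').toNat : Int) <<< 8))
    ((PySem.List.pyGetD cs (i + 2) 'A').toNat : Int)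

-- loop body of A's dedup pass: 'if trigrams[i] != trigrams[i-1]: deduped.append(trigrams[i])'
def pvBody (st : List Int) (acc : List Int) (i : Int) : List Int :=
  if PySem.List.pyGetD st i 0 ≠ PySem.List.pyGetD st (i - 1) 0 then
    acc ++ [PySem.List.pyGetD st i 0]
  else acc

def build_trigrams_py (s : String) : List Int :=
  let cs := s.toList
  if cs.length < 3 then []
  else
    let trigrams : List Int :=
      (PySem.List.pyRange 0 ((cs.length : Int) - 2) 1).map (pvTri cs)
    let st := PySem.List.sorted trigrams (fun x => x) false
    let deduped : List Int := [PySem.List.pyGetD st 0 0]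
    (PySem.List.pyRange 1 (st.length : Int) 1).foldl (pvBody st) deduped

-- ===== PORT B =====
-- _merge_unique: the while-loop merge of two lists, emitting a common value once
def pvMergeU : List Int → List Int → List Int
  | [], b => b
  | x :: a, [] => x :: a
  | x :: a, y :: b =>
      if x < y then x :: pvMergeU a (y :: b)
      else if y < x then y :: pvMergeU (x :: a) b
      else x :: pvMergeU a b
termination_by a b => a.length + b.length

-- _merge_unique_sort; mid = len(xs)//2 on a Nat length is exactly Python //, and xs[:mid] / xs[mid:] with 0 ≤ mid ≤ len(xs) are exactly take/drop
def pvMSort (xs : List Int) : List Int :=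
  if xs.length ≤ 1 then xs
  else
    pvMergeU (pvMSort (xs.take (xs.length / 2))) (pvMSort (xs.drop (xs.length / 2)))
termination_by xs.length
decreasing_by
  · simp only [List.length_take]; omega
  · simp only [List.length_drop]; omega

def build_trigrams_py_alt (s : String) : List Int :=
  let cs := s.toList
  pvMSort ((PySem.List.pyRange 0 ((cs.length : Int) - 2) 1).map (pvTri cs))

-- ===== PRECONDITION & SPEC =====
def Spec_build_trigrams_py (s : String) (out : List Int) : Prop := out = build_trigrams_py_alt s
instance (s : String) (out : List Int) : Decidable (Spec_build_trigrams_py s out) := by unfold Spec_build_trigrams_py; infer_instance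

-- ===== CLAIM (what is proved, stated in full; the proofs are below) =====
def Claim_equal_build_trigrams_py : Prop := ∀ (s : String), Dom_build_trigrams_py s → Spec_build_trigrams_py s (build_trigrams_py s)

-- ===== LEMMAS AND PROOFS =====

-- Two strictly increasing lists with the same members are equal.
lemma pv_eq_of_sorted_mem : ∀ (l1 l2 : List Int), List.Pairwise (· < ·) l1 →
    List.Pairwise (· < ·) l2 → (∀ x, x ∈ l1 ↔ x ∈ l2) → l1 = l2 := by
  intro l1
  induction l1 with
  | nil =>
      intro l2 _ _ hm
      cases l2 with
      | nil => rfl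
      | cons y t => exact absurd ((hm y).mpr (by simp)) (by simp)
  | cons x t1 ih =>
      intro l2 h1 h2 hm
      cases l2 with
      | nil => exact absurd ((hm x).mp (by simp)) (by simp)
      | cons y t2 =>
          have hx1 : ∀ z ∈ t1, x < z := (List.pairwise_cons.mp h1).1
          have hy2 : ∀ z ∈ t2, y < z := (List.pairwise_cons.mp h2).1
          have hxy : x = y := by
            have hx : x ∈ y :: t2 := (hm x).mp (by simp)
            have hy : y ∈ x :: t1 := (hm y).mpr (by simp)
            rcases List.mem_cons.mp hx with h | h
            · exact h
            · rcases List.mem_cons.mp hy with h' | h'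
              · exact h'.symm
              · exact absurd (hy2 x h) (not_lt.mpr (le_of_lt (hx1 y h')))
          subst hxy
          have hmt : ∀ z, z ∈ t1 ↔ z ∈ t2 := by
            intro z
            constructor
            · intro hz
              have hlt := hx1 z hz
              rcases List.mem_cons.mp ((hm z).mp (List.mem_cons_of_mem _ hz)) with h | h
              · exact absurd h (by omega)
              · exact h
            · intro hz
              have hlt := hy2 z hz
              rcases List.mem_cons.mp ((hm z).mpr (List.mem_cons_of_mem _ hz)) with h | h
              · exact absurd h (by omega)
              · exact h
          rw [ih t2 (List.pairwise_cons.mp h1).2 (List.pairwise_cons.mp h2).2 hmt]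

-- The deduplicating merge of two strictly increasing lists is strictly increasing
-- and holds exactly the union of their members.
lemma pvMergeU_spec : ∀ (a b : List Int), List.Pairwise (· < ·) a → List.Pairwise (· < ·) b →
    List.Pairwise (· < ·) (pvMergeU a b) ∧ ∀ x, x ∈ pvMergeU a b ↔ x ∈ a ∨ x ∈ b := by
  intro a b
  induction a, b using pvMergeU.induct with
  | case1 b => intro _ hb; simp [pvMergeU, hb]
  | case2 x a => intro ha _; simp [pvMergeU, ha]
  | case3 x a y b hlt ih =>
      intro ha hb
      obtain ⟨ih1, ih2⟩ := ih (List.pairwise_cons.mp ha).2 hb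
      have hxa : ∀ z ∈ a, x < z := (List.pairwise_cons.mp ha).1
      have hyb : ∀ z ∈ b, y < z := (List.pairwise_cons.mp hb).1
      constructor
      · rw [pvMergeU, if_pos hlt, List.pairwise_cons]
        refine ⟨?_, ih1⟩
        intro z hz
        rcases (ih2 z).mp hz with h | h
        · exact hxa z h
        · rcases List.mem_cons.mp h with h' | h'
          · omega
          · have := hyb z h'; omega
      · intro z
        rw [pvMergeU, if_pos hlt]
        simp only [List.mem_cons, ih2]
        tauto
  | case4 x a y b hnlt hlt ih =>
      intro ha hb
      obtain ⟨ih1, ih2⟩ := ih ha (List.pairwise_cons.mp hb).2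
      have hxa : ∀ z ∈ a, x < z := (List.pairwise_cons.mp ha).1
      have hyb : ∀ z ∈ b, y < z := (List.pairwise_cons.mp hb).1
      constructor
      · rw [pvMergeU, if_neg hnlt, if_pos hlt, List.pairwise_cons]
        refine ⟨?_, ih1⟩
        intro z hz
        rcases (ih2 z).mp hz with h | h
        · rcases List.mem_cons.mp h with h' | h'
          · omega
          · have := hxa z h'; omega
        · exact hyb z h
      · intro z
        rw [pvMergeU, if_neg hnlt, if_pos hlt]
        simp only [List.mem_cons, ih2]
        tauto
  | case5 x a y b hnlt hnlt' ih =>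
      intro ha hb
      have hxy : x = y := by omega
      obtain ⟨ih1, ih2⟩ := ih (List.pairwise_cons.mp ha).2 (List.pairwise_cons.mp hb).2
      have hxa : ∀ z ∈ a, x < z := (List.pairwise_cons.mp ha).1
      have hyb : ∀ z ∈ b, y < z := (List.pairwise_cons.mp hb).1
      constructor
      · rw [pvMergeU, if_neg hnlt, if_neg hnlt', List.pairwise_cons]
        refine ⟨?_, ih1⟩
        intro z hz
        rcases (ih2 z).mp hz with h | h
        · exact hxa z h
        · have := hyb z h; omega
      · intro z
        rw [pvMergeU, if_neg hnlt, if_neg hnlt']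
        simp only [List.mem_cons, ih2]
        constructor
        · rintro (rfl | h | h)
          · left; left; rfl
          · left; right; exact h
          · right; right; exact h
        · rintro ((rfl | h) | (rfl | h))
          · left; rfl
          · right; left; exact h
          · left; exact hxy.symm
          · right; right; exact h

-- The merge sort produces a strictly increasing list with exactly the input's members.
lemma pvMSort_spec : ∀ (xs : List Int),
    List.Pairwise (· < ·) (pvMSort xs) ∧ ∀ x, x ∈ pvMSort xs ↔ x ∈ xs := by
  intro xs
  induction xs using pvMSort.induct with
  | case1 xs h1 =>
      rw [pvMSort, if_pos h1]
      match xs, h1 with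
      | [], _ => simp
      | [a], _ => simp
  | case2 xs h1 ih1 ih2 =>
      rw [pvMSort, if_neg h1]
      obtain ⟨p1, m1⟩ := ih1
      obtain ⟨p2, m2⟩ := ih2
      obtain ⟨pm, mm⟩ := pvMergeU_spec _ _ p1 p2
      refine ⟨pm, ?_⟩
      intro x
      rw [mm x, m1 x, m2 x]
      rw [← List.mem_append, List.take_append_drop]

-- Invariant of A's dedup loop after the first n indices of the sorted list st:
-- the accumulator ends in st[n-1], is strictly increasing, and holds exactly the values of st.take n.
lemma pvInv (st : List Int) (hst : List.Pairwise (· ≤ ·) st)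
    (n : Nat) (h1 : 1 ≤ n) (h2 : n ≤ st.length) :
    ∃ r', (PySem.List.pyRange 1 (n : Int) 1).foldl (pvBody st) [PySem.List.pyGetD st 0 0]
        = r' ++ [st.getD (n - 1) 0]
      ∧ List.Pairwise (· < ·) (r' ++ [st.getD (n - 1) 0])
      ∧ ∀ x, x ∈ r' ++ [st.getD (n - 1) 0] ↔ x ∈ st.take n := by
  induction n, h1 using Nat.le_induction with
  | base =>
      have h0 : 0 < st.length := by omega
      have hg0 : PySem.List.pyGetD st 0 0 = st.getD 0 0 := by
        simpa using PySem.List.pyGetD_natCast st 0 0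
      refine ⟨[], ?_, by simp, ?_⟩
      · simp only [Nat.cast_one]
        rw [PySem.List.pyRange_one_eq_nil (le_refl (1 : Int))]
        simpa using hg0
      · intro x
        cases st with
        | nil => simp at h0
        | cons h t => simp
  | succ n hn ih =>
      obtain ⟨r', heq, hpw, hmem⟩ := ih (by omega)
      have hn' : n < st.length := by omega
      have hn1 : n - 1 < st.length := by omega
      have hcast : ((n + 1 : Nat) : Int) = (n : Int) + 1 := by push_cast; ring
      rw [hcast, PySem.List.pyRange_one_succ_right (by exact_mod_cast hn),
        List.foldl_append, heq]
      have hgn : PySem.List.pyGetD st (n : Int) 0 = st.getD n 0 :=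
        PySem.List.pyGetD_natCast st n 0
      have hgn1 : PySem.List.pyGetD st ((n : Int) - 1) 0 = st.getD (n - 1) 0 := by
        have hc : ((n : Int) - 1) = ((n - 1 : Nat) : Int) := by omega
        rw [hc]; exact PySem.List.pyGetD_natCast st (n - 1) 0
      have hab : st.getD (n - 1) 0 ≤ st.getD n 0 := by
        rw [List.getD_eq_getElem st 0 hn1, List.getD_eq_getElem st 0 hn']
        exact List.pairwise_iff_getElem.mp hst (n - 1) n hn1 hn' (by omega)
      have htake : st.take (n + 1) = st.take n ++ [st.getD n 0] := by
        rw [List.take_add_one, List.getElem?_eq_getElem hn',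
          List.getD_eq_getElem st 0 hn']
        rfl
      have hle : ∀ y ∈ st.take n, y ≤ st.getD (n - 1) 0 := by
        intro y hy
        obtain ⟨j, hj, hyj⟩ := List.mem_iff_getElem.mp hy
        have hjn : j < n := by
          have := hj; simp only [List.length_take] at this; omega
        rw [List.getElem_take] at hyj
        rw [List.getD_eq_getElem st 0 hn1, ← hyj]
        rcases Nat.lt_or_ge j (n - 1) with hjlt | hjge
        · exact List.pairwise_iff_getElem.mp hst j (n - 1) (by omega) hn1 hjlt
        · have hj1 : j = n - 1 := by omega
          subst hj1; exact le_refl _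
      have hmem' : ∀ x, (x ∈ r' ∨ x = st.getD (n - 1) 0) ↔ x ∈ st.take n := by
        intro x; simpa using hmem x
      simp only [List.foldl_cons, List.foldl_nil, pvBody, hgn, hgn1, Nat.add_sub_cancel]
      by_cases hbe : st.getD n 0 = st.getD (n - 1) 0
      · simp only [hbe, ne_eq, not_true_eq_false, if_false]
        refine ⟨r', rfl, hpw, ?_⟩
        intro x
        rw [htake, hbe]
        simp only [List.mem_append, List.mem_singleton]
        have hx' := hmem' x
        tauto
      · simp only [ne_eq, hbe, not_false_eq_true, if_true]
        have halt : st.getD (n - 1) 0 < st.getD n 0 := lt_of_le_of_ne hab (Ne.symm hbe)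
        refine ⟨r' ++ [st.getD (n - 1) 0], by simp, ?_, ?_⟩
        · rw [List.pairwise_append]
          refine ⟨hpw, by simp, ?_⟩
          intro a ha b hb
          simp only [List.mem_singleton] at hb; subst hb
          have hat : a ∈ st.take n := (hmem a).mp ha
          exact lt_of_le_of_lt (hle a hat) halt
        · intro x
          rw [htake]
          simp only [List.append_assoc, List.singleton_append, List.mem_append,
            List.mem_cons, List.not_mem_nil, or_false]
          have hx' := hmem' x
          tauto

lemma pv_main (s : String) : build_trigrams_py s = build_trigrams_py_alt s := by
  unfold build_trigrams_py build_trigrams_py_alt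
  by_cases h3 : s.toList.length < 3
  · have htri : PySem.List.pyRange 0 ((s.toList.length : Int) - 2) 1 = [] :=
      PySem.List.pyRange_one_eq_nil (by omega)
    simp only [h3, if_true, htri, List.map_nil]
    rw [pvMSort]
    simp
  · simp only [h3, if_false]
    set trigs := (PySem.List.pyRange 0 ((s.toList.length : Int) - 2) 1).map (pvTri s.toList)
      with htrigs
    have hlen1 : 1 ≤ (PySem.List.sorted trigs (fun x => x) false).length := by
      rw [PySem.List.length_sorted, htrigs]
      simp only [List.length_map, PySem.List.length_pyRange_one]
      omega
    obtain ⟨r', heq, hlt, hmem⟩ := pvInv _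
      (PySem.List.sorted_pairwise trigs (fun x => x)) _ hlen1 le_rfl
    obtain ⟨pB, mB⟩ := pvMSort_spec trigs
    rw [heq]
    apply pv_eq_of_sorted_mem _ _ hlt pB
    intro x
    rw [hmem x, List.take_length, PySem.List.mem_sorted, mB x]

-- ===== VERDICT (by name: the statement is the Claim_ definition above) =====
theorem build_trigrams_py_spec : Claim_equal_build_trigrams_py := by
  intro s _
  exact pv_main s
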